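-- pv_equiv track=rewrite | github.com/lamtung16/ML_ChangepointDetection | LOPART.py | error_count
-- ===== SOURCE A (Python) =====
-- def count_items_between(lst, a, b):
--     count = sum(1 for item in lst if a <= item < b)
--     return count
--
-- def error_count(chpnt, neg_start, neg_end, pos_start, pos_end):
--     fp_count, fn_count = 0, 0                           # initizlize false positive and false negative
--
--     for s, e in zip(neg_start, neg_end):
--         if(count_items_between(chpnt, s, e) > 0):       # number of change is not 0 in negative labels
--             fp_count += 1
--
--     for s, e in zip(pos_start, pos_end):
--         if(count_items_between(chpnt, s, e) > 1):       # number of change is greater than 1 in positive labels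
--             fp_count += 1
--         elif(count_items_between(chpnt, s, e) == 0):    # number of change is 0 in positive labels
--             fn_count += 1
--
--     return fp_count, fn_count
-- ===== SOURCE B (Python) =====
-- def error_count(chpnt, neg_start, neg_end, pos_start, pos_end):
--     srt = sorted(chpnt)
--
--     def _bisect_left(x):
--         lo, hi = 0, len(srt)
--         while lo < hi:
--             mid = (lo + hi) // 2
--             if srt[mid] < x:
--                 lo = mid + 1
--             else:
--                 hi = mid
--         return lo
--
--     fp, fn = 0, 0
--     for a, b in zip(neg_start, neg_end):
--         if _bisect_left(b) - _bisect_left(a) > 0: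
--             fp += 1
--     for a, b in zip(pos_start, pos_end):
--         c = _bisect_left(b) - _bisect_left(a)
--         if c > 1:
--             fp += 1
--         elif c <= 0:
--             fn += 1
--     return fp, fn
-- ===== Notes on version B (the rewrite author's own statement) =====
-- stated objective: faster
-- what changed: A rescans the whole changepoint list for every labeled interval; B sorts the changepoints once and answers each interval count with a hand-rolled binary search (difference of two bisect_left positions).
import Mathlib
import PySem

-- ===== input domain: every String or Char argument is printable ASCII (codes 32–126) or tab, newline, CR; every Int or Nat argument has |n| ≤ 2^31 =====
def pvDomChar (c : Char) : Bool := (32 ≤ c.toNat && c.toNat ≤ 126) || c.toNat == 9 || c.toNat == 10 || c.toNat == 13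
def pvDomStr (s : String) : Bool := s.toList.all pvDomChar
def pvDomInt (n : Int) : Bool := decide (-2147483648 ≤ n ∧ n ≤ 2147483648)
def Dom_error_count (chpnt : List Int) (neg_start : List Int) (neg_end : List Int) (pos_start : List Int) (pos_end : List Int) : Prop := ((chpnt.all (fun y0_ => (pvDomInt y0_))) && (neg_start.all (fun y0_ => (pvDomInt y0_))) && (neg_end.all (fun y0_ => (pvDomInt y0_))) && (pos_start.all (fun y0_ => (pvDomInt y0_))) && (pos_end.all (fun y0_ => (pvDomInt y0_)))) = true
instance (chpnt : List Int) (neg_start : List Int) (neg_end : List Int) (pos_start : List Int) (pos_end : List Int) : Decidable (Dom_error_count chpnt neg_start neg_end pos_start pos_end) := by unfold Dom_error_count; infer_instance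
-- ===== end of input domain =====

-- B sorts the changepoints once and counts per interval by binary search instead of rescanning the whole list per interval; measured faster (asymptotic).
-- ===== PORT A =====
def countItemsBetween (lst : List Int) (a b : Int) : Int :=
  lst.foldl (fun count item => if a ≤ item ∧ item < b then count + 1 else count) 0

def error_count (chpnt : List Int) (neg_start : List Int) (neg_end : List Int) (pos_start : List Int) (pos_end : List Int) : List Int :=
  let fp1 : Int := (List.zip neg_start neg_end).foldl
    (fun fp p => if countItemsBetween chpnt p.1 p.2 > 0 then fp + 1 else fp) 0
  let st := (List.zip pos_start pos_end).foldl
    (fun (st : Int × Int) p =>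
      if countItemsBetween chpnt p.1 p.2 > 1 then (st.1 + 1, st.2)
      else if countItemsBetween chpnt p.1 p.2 = 0 then (st.1, st.2 + 1)
      else st) (fp1, 0)
  [st.1, st.2]

-- ===== PORT B =====
-- Source B's hand-written bisect_left while-loop, with a fuel argument (= initial hi - lo bound) making the
-- recursion structural; srt[mid] is always in range (lo ≤ mid < hi ≤ len is maintained), so getD is exact
-- there, and lo, hi ≥ 0 so Python's (lo+hi)//2 is Nat division.
def bisectLeftB (srt : List Int) (x : Int) : Nat → Nat → Nat → Nat
  | 0, lo, _ => lo
  | fuel + 1, lo, hi =>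
    if lo < hi then
      if srt.getD ((lo + hi) / 2) 0 < x then bisectLeftB srt x fuel ((lo + hi) / 2 + 1) hi
      else bisectLeftB srt x fuel lo ((lo + hi) / 2)
    else lo

def error_count_alt (chpnt : List Int) (neg_start : List Int) (neg_end : List Int) (pos_start : List Int) (pos_end : List Int) : List Int :=
  let srt := PySem.List.sorted chpnt (fun c => c) false
  let fp1 : Int := (List.zip neg_start neg_end).foldl
    (fun fp p =>
      if (bisectLeftB srt p.2 srt.length 0 srt.length : Int) - (bisectLeftB srt p.1 srt.length 0 srt.length : Int) > 0
      then fp + 1 else fp) 0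
  let st := (List.zip pos_start pos_end).foldl
    (fun (st : Int × Int) p =>
      if (bisectLeftB srt p.2 srt.length 0 srt.length : Int) - (bisectLeftB srt p.1 srt.length 0 srt.length : Int) > 1 then (st.1 + 1, st.2)
      else if (bisectLeftB srt p.2 srt.length 0 srt.length : Int) - (bisectLeftB srt p.1 srt.length 0 srt.length : Int) ≤ 0 then (st.1, st.2 + 1)
      else st) (fp1, 0)
  [st.1, st.2]

-- ===== PRECONDITION & SPEC =====
def Spec_error_count (chpnt : List Int) (neg_start : List Int) (neg_end : List Int) (pos_start : List Int) (pos_end : List Int) (out : List Int) : Prop := out = error_count_alt chpnt neg_start neg_end pos_start pos_end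
instance (chpnt : List Int) (neg_start : List Int) (neg_end : List Int) (pos_start : List Int) (pos_end : List Int) (out : List Int) : Decidable (Spec_error_count chpnt neg_start neg_end pos_start pos_end out) := by unfold Spec_error_count; infer_instance

-- ===== CLAIM (what is proved, stated in full; the proofs are below) =====
def Claim_equal_error_count : Prop := ∀ (chpnt : List Int) (neg_start : List Int) (neg_end : List Int) (pos_start : List Int) (pos_end : List Int), Dom_error_count chpnt neg_start neg_end pos_start pos_end → Spec_error_count chpnt neg_start neg_end pos_start pos_end (error_count chpnt neg_start neg_end pos_start pos_end)

-- ===== LEMMAS AND PROOFS =====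

-- bisect invariant: on a sorted list the loop returns a cut point r with s[j] < x below r and x ≤ s[j] from r on
theorem bisectLeftB_inv (s : List Int)
    (hs : ∀ (i j : Nat) (hi : i < s.length) (hj : j < s.length), i ≤ j → s[i] ≤ s[j]) (x : Int) :
    ∀ (n lo hi : Nat), hi - lo ≤ n → hi ≤ s.length → lo ≤ hi →
      (∀ (j : Nat) (h : j < s.length), j < lo → s[j] < x) →
      (∀ (j : Nat) (h : j < s.length), hi ≤ j → x ≤ s[j]) →
      bisectLeftB s x n lo hi ≤ s.length ∧
        (∀ (j : Nat) (h : j < s.length), j < bisectLeftB s x n lo hi → s[j] < x) ∧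
        (∀ (j : Nat) (h : j < s.length), bisectLeftB s x n lo hi ≤ j → x ≤ s[j]) := by
  intro n
  induction n with
  | zero =>
    intro lo hi hn hhi hlo hlow hhigh
    rw [bisectLeftB]
    exact ⟨by omega, hlow, fun j h hj => hhigh j h (by omega)⟩
  | succ n ih =>
    intro lo hi hn hhi hlo hlow hhigh
    rw [bisectLeftB]
    by_cases h : lo < hi
    · simp only [if_pos h]
      have hmid1 : lo ≤ (lo + hi) / 2 := by omega
      have hmid2 : (lo + hi) / 2 < hi := by omega
      have hmlt : (lo + hi) / 2 < s.length := by omega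
      rw [List.getD_eq_getElem s 0 hmlt]
      by_cases hc : s[(lo + hi) / 2] < x
      · simp only [if_pos hc]
        exact ih ((lo + hi) / 2 + 1) hi (by omega) hhi (by omega)
          (fun j hj hjm => lt_of_le_of_lt (hs j ((lo + hi) / 2) hj hmlt (by omega)) hc) hhigh
      · simp only [if_neg hc]
        exact ih lo ((lo + hi) / 2) (by omega) (by omega) (by omega) hlow
          (fun j hj hjm => le_trans (le_of_not_gt hc) (hs ((lo + hi) / 2) j hmlt hj hjm))
    · simp only [if_neg h]
      exact ⟨by omega, hlow, fun j hj hjl => hhigh j hj (by omega)⟩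

-- a cut point determines countP
theorem countP_eq_of_cut (p : Int → Bool) :
    ∀ (s : List Int) (r : Nat), r ≤ s.length →
      (∀ (j : Nat) (h : j < s.length), j < r → p s[j]) →
      (∀ (j : Nat) (h : j < s.length), r ≤ j → ¬ p s[j]) →
      s.countP p = r := by
  intro s
  induction s with
  | nil => intro r hr _ _; simp only [List.length_nil] at hr; simp [Nat.le_zero.mp hr]
  | cons a t ih =>
    intro r hr hlo hhi
    cases r with
    | zero =>
      have ha : ¬ (p a = true) := hhi 0 (by simp) (by omega)
      have ht := ih 0 (by omega) (fun j hj hjr => absurd hjr (by omega))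
        (fun j hj _ => by simpa using hhi (j + 1) (by simpa using Nat.succ_lt_succ hj) (by omega))
      simp [ha, ht]
    | succ r' =>
      have ha : p a = true := hlo 0 (by simp) (by omega)
      have ht := ih r' (by simpa using hr)
        (fun j hj hjr => by simpa using hlo (j + 1) (by simpa using Nat.succ_lt_succ hj) (by omega))
        (fun j hj hjr => by simpa using hhi (j + 1) (by simpa using Nat.succ_lt_succ hj) (by omega))
      simp [ha, ht]

theorem bisectLeftB_countP (s : List Int) (hs : s.Pairwise (· ≤ ·)) (x : Int) :
    bisectLeftB s x s.length 0 s.length = s.countP (fun c => decide (c < x)) := by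
  have hmono : ∀ (i j : Nat) (hi : i < s.length) (hj : j < s.length), i ≤ j → s[i] ≤ s[j] := by
    intro i j hi hj hij
    rcases Nat.lt_or_ge i j with h | h
    · exact List.pairwise_iff_getElem.mp hs i j hi hj h
    · have hij' : i = j := by omega
      subst hij'; exact le_refl _
  obtain ⟨h1, h2, h3⟩ := bisectLeftB_inv s hmono x s.length 0 s.length (by omega) (le_refl _) (by omega)
    (fun j h hj => absurd hj (by omega)) (fun j h hj => absurd (Nat.lt_of_lt_of_le h hj) (by omega))
  exact (countP_eq_of_cut _ s _ h1 (fun j h hj => by simpa using h2 j h hj)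
    (fun j h hj => by simpa using h3 j h hj)).symm

-- A's counting helper is a countP
theorem countItemsBetween_eq (lst : List Int) (a b : Int) :
    countItemsBetween lst a b = (lst.countP (fun c => decide (a ≤ c ∧ c < b)) : Int) := by
  unfold countItemsBetween
  rw [show (fun (count : Int) item => if a ≤ item ∧ item < b then count + 1 else count)
        = (fun (count : Int) item => if (fun c => decide (a ≤ c ∧ c < b)) item = true then count + 1 else count) from by
      funext count item; simp]
  simpa using PySem.List.foldl_count_if (fun c => decide (a ≤ c ∧ c < b)) lst 0

-- split countP(< b) into the part below a and the band [a, b)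
theorem countP_split (l : List Int) (a b : Int) :
    l.countP (fun c => decide (c < b))
      = l.countP (fun c => decide (c < a ∧ c < b)) + l.countP (fun c => decide (a ≤ c ∧ c < b)) := by
  induction l with
  | nil => simp
  | cons y t ih =>
    rw [List.countP_cons, List.countP_cons, List.countP_cons, ih]
    split_ifs <;> simp only [decide_eq_true_eq] at * <;> omega

-- the three per-interval comparisons agree between counting in [a,b) and a difference of one-sided counts
theorem band_facts (l : List Int) (a b : Int) :
    ((l.countP (fun c => decide (c < b)) : Int) - (l.countP (fun c => decide (c < a)) : Int) > 0
       ↔ (l.countP (fun c => decide (a ≤ c ∧ c < b)) : Int) > 0) ∧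
    ((l.countP (fun c => decide (c < b)) : Int) - (l.countP (fun c => decide (c < a)) : Int) > 1
       ↔ (l.countP (fun c => decide (a ≤ c ∧ c < b)) : Int) > 1) ∧
    (¬ ((l.countP (fun c => decide (c < b)) : Int) - (l.countP (fun c => decide (c < a)) : Int) > 1) →
      (((l.countP (fun c => decide (c < b)) : Int) - (l.countP (fun c => decide (c < a)) : Int) ≤ 0)
        ↔ (l.countP (fun c => decide (a ≤ c ∧ c < b)) : Int) = 0)) := by
  have hsplit := countP_split l a b
  by_cases hab : a ≤ b
  · have hL : l.countP (fun c => decide (c < a ∧ c < b)) = l.countP (fun c => decide (c < a)) := by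
      apply List.countP_congr
      intro c _
      simp only [decide_eq_true_eq]
      constructor
      · exact fun h => h.1
      · exact fun h => ⟨h, lt_of_lt_of_le h hab⟩
    refine ⟨by omega, by omega, by omega⟩
  · have hM : l.countP (fun c => decide (a ≤ c ∧ c < b)) = 0 := by
      apply List.countP_eq_zero.mpr
      intro c _
      simp only [decide_eq_true_eq]
      omega
    have hUL : l.countP (fun c => decide (c < b)) ≤ l.countP (fun c => decide (c < a)) := by
      apply List.countP_mono_left
      intro c _ h
      simp only [decide_eq_true_eq] at h ⊢
      omega
    refine ⟨by omega, by omega, by omega⟩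

-- the bisect difference on sorted(chpnt) seen back on chpnt
theorem bisect_on_sorted (chpnt : List Int) (x : Int) :
    bisectLeftB (PySem.List.sorted chpnt (fun c => c) false) x
        (PySem.List.sorted chpnt (fun c => c) false).length 0 (PySem.List.sorted chpnt (fun c => c) false).length
      = chpnt.countP (fun c => decide (c < x)) := by
  have hpw : (PySem.List.sorted chpnt (fun c => c) false).Pairwise (· ≤ ·) := by
    simpa using PySem.List.sorted_pairwise chpnt (fun c => c)
  rw [bisectLeftB_countP _ hpw x]
  exact (PySem.List.sorted_perm chpnt (fun c => c) false).countP_eq _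

-- ===== VERDICT (by name: the statement is the Claim_ definition above) =====
theorem error_count_spec : Claim_equal_error_count := by
  intro chpnt neg_start neg_end pos_start pos_end _
  unfold Spec_error_count
  unfold error_count error_count_alt
  have key : ∀ p : Int × Int,
      ((bisectLeftB (PySem.List.sorted chpnt (fun c => c) false) p.2
          (PySem.List.sorted chpnt (fun c => c) false).length 0 (PySem.List.sorted chpnt (fun c => c) false).length : Int)
        - (bisectLeftB (PySem.List.sorted chpnt (fun c => c) false) p.1
          (PySem.List.sorted chpnt (fun c => c) false).length 0 (PySem.List.sorted chpnt (fun c => c) false).length : Int)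
        = (chpnt.countP (fun c => decide (c < p.2)) : Int) - (chpnt.countP (fun c => decide (c < p.1)) : Int)) := by
    intro p
    rw [bisect_on_sorted chpnt p.2, bisect_on_sorted chpnt p.1]
  have hneg : (fun (fp : Int) (p : Int × Int) =>
        if (bisectLeftB (PySem.List.sorted chpnt (fun c => c) false) p.2
              (PySem.List.sorted chpnt (fun c => c) false).length 0 (PySem.List.sorted chpnt (fun c => c) false).length : Int)
            - (bisectLeftB (PySem.List.sorted chpnt (fun c => c) false) p.1
              (PySem.List.sorted chpnt (fun c => c) false).length 0 (PySem.List.sorted chpnt (fun c => c) false).length : Int) > 0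
        then fp + 1 else fp)
      = (fun (fp : Int) (p : Int × Int) => if countItemsBetween chpnt p.1 p.2 > 0 then fp + 1 else fp) := by
    funext fp p
    obtain ⟨f1, _, _⟩ := band_facts chpnt p.1 p.2
    rw [key p, countItemsBetween_eq chpnt p.1 p.2]
    by_cases h : (chpnt.countP (fun c => decide (p.1 ≤ c ∧ c < p.2)) : Int) > 0
    · rw [if_pos (f1.mpr h), if_pos h]
    · rw [if_neg (fun hc => h (f1.mp hc)), if_neg h]
  have hpos : (fun (st : Int × Int) (p : Int × Int) =>
        if (bisectLeftB (PySem.List.sorted chpnt (fun c => c) false) p.2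
              (PySem.List.sorted chpnt (fun c => c) false).length 0 (PySem.List.sorted chpnt (fun c => c) false).length : Int)
            - (bisectLeftB (PySem.List.sorted chpnt (fun c => c) false) p.1
              (PySem.List.sorted chpnt (fun c => c) false).length 0 (PySem.List.sorted chpnt (fun c => c) false).length : Int) > 1 then (st.1 + 1, st.2)
        else if (bisectLeftB (PySem.List.sorted chpnt (fun c => c) false) p.2
              (PySem.List.sorted chpnt (fun c => c) false).length 0 (PySem.List.sorted chpnt (fun c => c) false).length : Int)
            - (bisectLeftB (PySem.List.sorted chpnt (fun c => c) false) p.1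
              (PySem.List.sorted chpnt (fun c => c) false).length 0 (PySem.List.sorted chpnt (fun c => c) false).length : Int) ≤ 0 then (st.1, st.2 + 1)
        else st)
      = (fun (st : Int × Int) (p : Int × Int) =>
        if countItemsBetween chpnt p.1 p.2 > 1 then (st.1 + 1, st.2)
        else if countItemsBetween chpnt p.1 p.2 = 0 then (st.1, st.2 + 1)
        else st) := by
    funext st p
    obtain ⟨_, f2, f3⟩ := band_facts chpnt p.1 p.2
    rw [key p, countItemsBetween_eq chpnt p.1 p.2]
    by_cases h : (chpnt.countP (fun c => decide (p.1 ≤ c ∧ c < p.2)) : Int) > 1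
    · rw [if_pos (f2.mpr h), if_pos h]
    · rw [if_neg (fun hc => h (f2.mp hc)), if_neg h]
      have f3' := f3 (fun hc => h (f2.mp hc))
      by_cases h0 : (chpnt.countP (fun c => decide (p.1 ≤ c ∧ c < p.2)) : Int) = 0
      · rw [if_pos (f3'.mpr h0), if_pos h0]
      · rw [if_neg (fun hc => h0 (f3'.mp hc)), if_neg h0]
  simp only [hneg, hpos]
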